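-- pv_equiv track=rewrite | github.com/evansonscott-glitch/market-simulation-agent | web/server.py | _clean_emoji
-- ===== SOURCE A (Python) =====
-- def _clean_emoji(text: str) -> str:
--     """Convert Slack-style emoji to Unicode for web display."""
--     replacements = {
--         ":wave:": "👋", ":rocket:": "🚀", ":white_check_mark:": "✅",
--         ":x:": "❌", ":hourglass_flowing_sand:": "⏳", ":earth_americas:": "🌎",
--         ":busts_in_silhouette:": "👥", ":speech_balloon:": "💬",
--         ":bar_chart:": "📊", ":tada:": "🎉", ":memo:": "📝",
--         ":dart:": "🎯", ":thinking_face:": "🤔", ":file_folder:": "📁",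
--         ":clipboard:": "📋", ":eyes:": "👀", ":stop_sign:": "🛑",
--         ":mag:": "🔍", ":page_facing_up:": "📄", ":bulb:": "💡",
--         ":warning:": "⚠️", ":star:": "⭐", ":fire:": "🔥",
--     }
--     for slack, unicode in replacements.items():
--         text = text.replace(slack, unicode)
--     return text
-- ===== SOURCE B (Python) =====
-- _EMOJI = {
--     "wave": "👋", "rocket": "🚀", "white_check_mark": "✅",
--     "x": "❌", "hourglass_flowing_sand": "⏳", "earth_americas": "🌎",
--     "busts_in_silhouette": "👥", "speech_balloon": "💬",
--     "bar_chart": "📊", "tada": "🎉", "memo": "📝",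
--     "dart": "🎯", "thinking_face": "🤔", "file_folder": "📁",
--     "clipboard": "📋", "eyes": "👀", "stop_sign": "🛑",
--     "mag": "🔍", "page_facing_up": "📄", "bulb": "💡",
--     "warning": "⚠️", "star": "⭐", "fire": "🔥",
-- }
--
--
-- def _is_word(c: str) -> bool:
--     return ('a' <= c <= 'z') or ('A' <= c <= 'Z') or ('0' <= c <= '9') or c == '_'
--
--
-- def _clean_emoji(text: str) -> str:
--     """Convert Slack-style emoji to Unicode for web display."""
--     # one pass: at each ':' read the following word run; if it is closed by
--     # another ':' and names a known emoji, emit the emoji, else copy the char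
--     out = []
--     i, n = 0, len(text)
--     while i < n:
--         c = text[i]
--         if c == ':':
--             j = i + 1
--             while j < n and _is_word(text[j]):
--                 j += 1
--             name = text[i + 1:j]
--             if j < n and text[j] == ':' and name in _EMOJI:
--                 out.append(_EMOJI[name])
--                 i = j + 1
--                 continue
--         out.append(c)
--         i += 1
--     return ''.join(out)
-- ===== Notes on version B (the rewrite author's own statement) =====
-- stated objective: alternative
-- what changed: One left-to-right pass that, at each colon, reads the following word run and looks the name up in a name-keyed dict (unknown names fall through), instead of 23 sequential full-string str.replace passes; Pre_ excludes texts with two overlapping emoji-code occurrences (two codes can share a colon, e.g. ':star:x:'), where which code wins depends on an unspecified priority (A: dict order, B: textual order) and both results are defensible.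
-- outside the precondition, e.g. on _clean_emoji(':star:x:'): A returns ':star❌', B returns '⭐x:'
import Mathlib
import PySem

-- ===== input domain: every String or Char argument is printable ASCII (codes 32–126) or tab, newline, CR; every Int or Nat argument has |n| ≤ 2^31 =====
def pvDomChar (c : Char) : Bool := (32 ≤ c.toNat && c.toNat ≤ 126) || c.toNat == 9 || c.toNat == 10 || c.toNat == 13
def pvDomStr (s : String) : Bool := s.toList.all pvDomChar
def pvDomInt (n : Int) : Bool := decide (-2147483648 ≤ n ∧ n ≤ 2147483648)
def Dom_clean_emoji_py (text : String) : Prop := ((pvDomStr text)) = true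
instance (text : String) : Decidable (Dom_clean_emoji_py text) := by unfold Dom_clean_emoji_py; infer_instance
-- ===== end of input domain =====

-- B replaces A's 23 sequential full-string replace passes by one left-to-right scan that, at
-- each colon, reads the following word run and looks its name up in a name-keyed table
-- (objective: alternative single-pass algorithm, same results on Pre_).

-- ===== PORT A =====
-- the replacements dict, in insertion order
def pvTable : List (String × String) :=
  [(":wave:", "👋"), (":rocket:", "🚀"), (":white_check_mark:", "✅"),
   (":x:", "❌"), (":hourglass_flowing_sand:", "⏳"), (":earth_americas:", "🌎"),
   (":busts_in_silhouette:", "👥"), (":speech_balloon:", "💬"),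
   (":bar_chart:", "📊"), (":tada:", "🎉"), (":memo:", "📝"),
   (":dart:", "🎯"), (":thinking_face:", "🤔"), (":file_folder:", "📁"),
   (":clipboard:", "📋"), (":eyes:", "👀"), (":stop_sign:", "🛑"),
   (":mag:", "🔍"), (":page_facing_up:", "📄"), (":bulb:", "💡"),
   (":warning:", "⚠️"), (":star:", "⭐"), (":fire:", "🔥")]

-- A: for slack, unicode in replacements.items(): text = text.replace(slack, unicode)
def clean_emoji_py (text : String) : String :=
  pvTable.foldl (fun t p => PySem.Str.replace t p.1 p.2) text

-- ===== PORT B =====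
-- B's table _EMOJI, keyed by the emoji NAME (no colons), in insertion order
def pvEmoji : List (List Char × List Char) :=
  [("wave".toList, "👋".toList), ("rocket".toList, "🚀".toList),
   ("white_check_mark".toList, "✅".toList), ("x".toList, "❌".toList),
   ("hourglass_flowing_sand".toList, "⏳".toList), ("earth_americas".toList, "🌎".toList),
   ("busts_in_silhouette".toList, "👥".toList), ("speech_balloon".toList, "💬".toList),
   ("bar_chart".toList, "📊".toList), ("tada".toList, "🎉".toList),
   ("memo".toList, "📝".toList), ("dart".toList, "🎯".toList),
   ("thinking_face".toList, "🤔".toList), ("file_folder".toList, "📁".toList),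
   ("clipboard".toList, "📋".toList), ("eyes".toList, "👀".toList),
   ("stop_sign".toList, "🛑".toList), ("mag".toList, "🔍".toList),
   ("page_facing_up".toList, "📄".toList), ("bulb".toList, "💡".toList),
   ("warning".toList, "⚠️".toList), ("star".toList, "⭐".toList),
   ("fire".toList, "🔥".toList)]

-- _is_word: ('a' <= c <= 'z') or ('A' <= c <= 'Z') or ('0' <= c <= '9') or c == '_'
def pvIsWord (c : Char) : Bool :=
  ('a' ≤ c && c ≤ 'z') || ('A' ≤ c && c ≤ 'Z') || ('0' ≤ c && c ≤ '9') || c = '_'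

-- `name in _EMOJI` + `_EMOJI[name]` as one association-list lookup (first key match)
def pvLookup (ps : List (List Char × List Char)) (w : List Char) : Option (List Char) :=
  match ps with
  | [] => none
  | p :: rest => if p.1 = w then some p.2 else pvLookup rest w

-- B's while loop: at ':' read the word run (j / text[i+1:j]); if closed by ':' and known,
-- emit the emoji and resume after the closing colon, else copy the char and advance one
def pvScanB (s : List Char) : List Char :=
  match s with
  | [] => []
  | c :: t =>
    if c = ':' then
      match h1 : t.drop (t.takeWhile pvIsWord).length, pvLookup pvEmoji (t.takeWhile pvIsWord) with
      | ':' :: r, some e => e ++ pvScanB r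
      | _, _ => c :: pvScanB t
    else c :: pvScanB t
termination_by s.length
decreasing_by
  · have := congrArg List.length h1
    simp only [List.length_drop, List.length_cons] at this ⊢
    omega
  · simp
  · simp

def clean_emoji_py_alt (text : String) : String := String.ofList (pvScanB text.toList)

-- ===== PRECONDITION & SPEC =====
-- the codes of A's table as code-point lists (used by Pre_ and the proofs)
def pvTableB : List (List Char × List Char) := pvTable.map (fun p => (p.1.toList, p.2.toList))

-- Pre_ excludes texts containing two OVERLAPPING emoji-code occurrences (two codes can share a
-- colon, e.g. ":star:x:"): there which code wins depends on an unspecified priority — A's dict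
-- order vs B's left-to-right scan — and both outcomes are defensible.
def Pre_clean_emoji_py (text : String) : Prop :=
  ∀ p1 ∈ pvTableB, ∀ p2 ∈ pvTableB, ∀ i < text.toList.length, ∀ j < text.toList.length,
    (p1.1 <+: text.toList.drop i ∧ p2.1 <+: text.toList.drop j ∧ ¬(p1.1 = p2.1 ∧ i = j)) →
    i + p1.1.length ≤ j ∨ j + p2.1.length ≤ i
instance (text : String) : Decidable (Pre_clean_emoji_py text) := by
  unfold Pre_clean_emoji_py; infer_instance

def pvWitness_clean_emoji_py : String := ":wave: hi"

def Spec_clean_emoji_py (text : String) (out : String) : Prop := out = clean_emoji_py_alt text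
instance (text : String) (out : String) : Decidable (Spec_clean_emoji_py text out) := by
  unfold Spec_clean_emoji_py; infer_instance

-- ===== CLAIM (what is proved, stated in full; the proofs are below) =====
def Claim_equal_clean_emoji_py : Prop :=
  ∀ (text : String), Dom_clean_emoji_py text → Pre_clean_emoji_py text →
    Spec_clean_emoji_py text (clean_emoji_py text)

-- ===== LEMMAS AND PROOFS =====

-- ---- proof-side first-match probe over full codes, and the scanner built on it ----
def pvTry (ps : List (List Char × List Char)) (s : List Char) : Option (List Char × Nat) :=
  match ps with
  | [] => none
  | p :: rest => if p.1.isPrefixOf s then some (p.2, p.1.length) else pvTry rest s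

theorem pvTry_some_le {ps : List (List Char × List Char)} {s e : List Char} {k : Nat}
    (h : pvTry ps s = some (e, k)) (hpos : ∀ p ∈ ps, p.1 ≠ []) : 0 < k ∧ k ≤ s.length := by
  induction ps with
  | nil => simp [pvTry] at h
  | cons p rest ih =>
    rw [pvTry] at h
    split at h
    · rename_i hp
      cases h
      have hpre : p.1 <+: s := List.isPrefixOf_iff_prefix.mp hp
      refine ⟨?_, hpre.length_le⟩
      have hne := hpos p (by simp)
      cases hq : p.1 with
      | nil => exact absurd hq hne
      | cons c l => simp
    · exact ih h (fun q hq => hpos q (by simp [hq]))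

def pvScan (s : List Char) : List Char :=
  match s with
  | [] => []
  | a :: t =>
    if a = ':' then
      match h : pvTry pvTableB (a :: t) with
      | some (e, k) => e ++ pvScan ((a :: t).drop k)
      | none => a :: pvScan t
    else a :: pvScan t
termination_by s.length
decreasing_by
  · obtain ⟨h1, _⟩ := pvTry_some_le h (by decide)
    simp only [List.length_drop, List.length_cons]
    omega
  · simp
  · simp

-- ---- equation lemmas for the probe scanner ----
theorem pvScan_nil : pvScan [] = [] := by rw [pvScan]

theorem pvScan_cons_none {a : Char} {t : List Char} (h : pvTry pvTableB (a :: t) = none) :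
    pvScan (a :: t) = a :: pvScan t := by
  rw [pvScan]
  by_cases ha : a = ':'
  · rw [if_pos ha]
    split
    · rename_i e k heq
      rw [h] at heq
      cases heq
    · rfl
  · rw [if_neg ha]

theorem pvScan_cons_some {a : Char} {t e : List Char} {k : Nat}
    (h : pvTry pvTableB (a :: t) = some (e, k)) (ha : a = ':') :
    pvScan (a :: t) = e ++ pvScan ((a :: t).drop k) := by
  rw [pvScan, if_pos ha]
  split
  · rename_i e' k' heq
    rw [h] at heq
    simp only [Option.some.injEq, Prod.mk.injEq] at heq
    rw [heq.1, heq.2]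
  · rename_i heq
    rw [h] at heq
    cases heq

-- ---- equation lemmas for B's word-run scanner ----
theorem pvScanB_nil : pvScanB [] = [] := by rw [pvScanB]

theorem pvScanB_cons_other {c : Char} {t : List Char} (hc : c ≠ ':') :
    pvScanB (c :: t) = c :: pvScanB t := by
  rw [pvScanB, if_neg hc]

theorem pvScanB_hit {t r e : List Char}
    (hD : t.drop (t.takeWhile pvIsWord).length = ':' :: r)
    (hL : pvLookup pvEmoji (t.takeWhile pvIsWord) = some e) :
    pvScanB ((':' : Char) :: t) = e ++ pvScanB r := by
  rw [pvScanB, if_pos rfl]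
  split
  · rename_i r' e' h1 h2
    rw [hD] at h1
    rw [hL] at h2
    cases h1
    cases h2
    rfl
  · rename_i hno
    exact (hno r e hD hL).elim

theorem pvScanB_miss {t : List Char}
    (h : ∀ r e, ¬(t.drop (t.takeWhile pvIsWord).length = ':' :: r ∧
      pvLookup pvEmoji (t.takeWhile pvIsWord) = some e)) :
    pvScanB ((':' : Char) :: t) = ':' :: pvScanB t := by
  rw [pvScanB, if_pos rfl]
  split
  · rename_i r' e' h1 h2
    exact absurd ⟨h1, h2⟩ (h r' e')
  · rfl

-- ---- proof-side model of Python's str.replace (nonempty needle) ----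
def pvRepl (old new : List Char) (s : List Char) : List Char :=
  match s with
  | [] => []
  | a :: t =>
    if old.isPrefixOf (a :: t) then new ++ pvRepl old new (t.drop (old.length - 1))
    else a :: pvRepl old new t
termination_by s.length
decreasing_by
  · simp only [List.length_drop, List.length_cons]; omega
  · simp

theorem pvRepl_nil (old new : List Char) : pvRepl old new [] = [] := by rw [pvRepl]

theorem pvRepl_neg {old : List Char} (new : List Char) {a : Char} {t : List Char}
    (h : ¬ old <+: a :: t) : pvRepl old new (a :: t) = a :: pvRepl old new t := by
  rw [pvRepl, if_neg (by simpa [List.isPrefixOf_iff_prefix] using h)]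

theorem pvRepl_prefix {old : List Char} (new : List Char) {l : List Char}
    (hold : old ≠ []) (h : old <+: l) :
    pvRepl old new l = new ++ pvRepl old new (l.drop old.length) := by
  cases l with
  | nil =>
    cases old with
    | nil => exact absurd rfl hold
    | cons a b => simp at h
  | cons a t =>
    rw [pvRepl, if_pos (List.isPrefixOf_iff_prefix.mpr h)]
    cases hm : old.length with
    | zero => exact absurd (List.length_eq_zero_iff.mp hm) hold
    | succ m => simp

theorem go_eq_pvRepl (old new : List Char) (hold : old ≠ []) :
    ∀ fuel l acc, l.length ≤ fuel →
      PySem.Chars.replace.go old new fuel l acc = acc.reverse ++ pvRepl old new l := by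
  intro fuel
  induction fuel with
  | zero =>
    intro l acc hl
    have : l = [] := List.length_eq_zero_iff.mp (Nat.le_zero.mp hl)
    subst this
    rw [PySem.Chars.replace.go, pvRepl_nil]
  | succ m ih =>
    intro l acc hl
    cases l with
    | nil =>
      rw [PySem.Chars.replace.go, pvRepl_nil]
      simp
      omega
    | cons c t =>
      by_cases hp : old.isPrefixOf (c :: t) = true
      · rw [PySem.Chars.replace.go]
        simp only [hp, if_true]
        have hlen : 1 ≤ old.length := by
          cases ho : old with
          | nil => exact absurd ho hold
          | cons x y => simp
        have hl' : t.length + 1 ≤ m + 1 := by simpa using hl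
        rw [ih ((c :: t).drop old.length) (new.reverse ++ acc)
          (by rw [List.length_drop]; simp only [List.length_cons]; omega)]
        rw [pvRepl_prefix new hold (List.isPrefixOf_iff_prefix.mp hp)]
        simp
      · rw [PySem.Chars.replace.go]
        simp only [hp]
        have hl' : t.length + 1 ≤ m + 1 := by simpa using hl
        rw [ih t (c :: acc) (by omega)]
        rw [pvRepl_neg new (fun hc => hp (List.isPrefixOf_iff_prefix.mpr hc))]
        simp

theorem replace_eq_pvRepl (old new s : List Char) (hold : old ≠ []) :
    PySem.Chars.replace s old new = pvRepl old new s := by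
  rw [PySem.Chars.replace, if_neg (by simpa [List.isEmpty_iff] using hold)]
  simpa using go_eq_pvRepl old new hold s.length s [] le_rfl

-- ---- ASCII separation ----
def pvAscii (c : Char) : Bool := c.toNat < 128

def pvGood (p : List Char × List Char) : Prop :=
  p.1 ≠ [] ∧ (∀ ch ∈ p.1, pvAscii ch = true) ∧ p.2 ≠ [] ∧ (∀ ch ∈ p.2, pvAscii ch = false)

theorem pvTableB_good : ∀ p ∈ pvTableB, pvGood p := by
  have h : pvTableB.all (fun p => !p.1.isEmpty && p.1.all pvAscii &&
      !p.2.isEmpty && p.2.all (fun c => !pvAscii c)) = true := by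
    unfold pvTableB pvTable pvAscii
    simp only [List.map_cons, List.map_nil, String.reduceToList]
    decide
  intro p hp
  have hh := List.all_eq_true.mp h p hp
  simp only [Bool.and_eq_true] at hh
  obtain ⟨⟨⟨h1, h2⟩, h3⟩, h4⟩ := hh
  refine ⟨by simpa [List.isEmpty_iff] using h1,
    fun ch hch => List.all_eq_true.mp h2 ch hch,
    by simpa [List.isEmpty_iff] using h3,
    fun ch hch => by simpa using List.all_eq_true.mp h4 ch hch⟩

-- an ASCII word is never a prefix of (non-ASCII block ++ anything)
theorem no_prefix_of_nonascii {p m w : List Char} (hp : p ≠ []) (hpa : ∀ ch ∈ p, pvAscii ch = true)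
    (hm : m ≠ []) (hma : ∀ ch ∈ m, pvAscii ch = false) : ¬ p <+: m ++ w := by
  cases p with
  | nil => exact absurd rfl hp
  | cons a p' =>
    cases m with
    | nil => exact absurd rfl hm
    | cons b m' =>
      intro h
      rw [List.cons_append, List.cons_prefix_cons] at h
      have h1 := hpa a (by simp)
      have h2 := hma b (by simp)
      rw [h.1] at h1
      rw [h1] at h2
      cases h2

-- an all-ASCII prefix survives pvRepl backwards (replacements are entirely non-ASCII)
theorem prefix_transfer {old new : List Char} (hold : old ≠ []) (hnew : new ≠ [])
    (hna : ∀ ch ∈ new, pvAscii ch = false) :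
    ∀ n s p, s.length ≤ n → (∀ ch ∈ p, pvAscii ch = true) →
      p <+: pvRepl old new s → p <+: s := by
  intro n
  induction n with
  | zero =>
    intro s p hs hpa hpre
    have : s = [] := List.length_eq_zero_iff.mp (Nat.le_zero.mp hs)
    subst this
    rwa [pvRepl_nil] at hpre
  | succ m ih =>
    intro s p hs hpa hpre
    cases s with
    | nil => rwa [pvRepl_nil] at hpre
    | cons a t =>
      by_cases hp : old <+: a :: t
      · rw [pvRepl_prefix new hold hp] at hpre
        cases hq : p with
        | nil => exact List.nil_prefix
        | cons b p' =>
          subst hq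
          exact absurd hpre (no_prefix_of_nonascii (by simp) hpa hnew hna)
      · rw [pvRepl_neg new hp] at hpre
        cases hq : p with
        | nil => exact List.nil_prefix
        | cons b p' =>
          subst hq
          rw [List.cons_prefix_cons] at hpre ⊢
          refine ⟨hpre.1, ih t p' (by simpa using Nat.succ_le_succ_iff.mp hs)
            (fun ch hch => hpa ch (by simp [hch])) hpre.2⟩

-- pvRepl passes an occurrence-free block through unchanged
theorem pvRepl_append {old : List Char} (new : List Char) :
    ∀ u v, (∀ i < u.length, ¬ old <+: (u ++ v).drop i) →
      pvRepl old new (u ++ v) = u ++ pvRepl old new v := by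
  intro u
  induction u with
  | nil => intro v _; rfl
  | cons a u' ih =>
    intro v h
    have h0 : ¬ old <+: a :: (u' ++ v) := by simpa using h 0 (by simp)
    rw [List.cons_append, pvRepl_neg new h0, ih v ?_]
    · rfl
    · intro i hi
      simpa [List.drop_succ_cons] using h (i + 1) (by simpa using Nat.succ_lt_succ hi)

-- ---- the chain of replaces (A's fold), over code-point lists ----
def pvChain (ps : List (List Char × List Char)) (s : List Char) : List Char :=
  ps.foldl (fun s p => pvRepl p.1 p.2 s) s

theorem pvChain_nil (ps : List (List Char × List Char)) : pvChain ps [] = [] := by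
  induction ps with
  | nil => rfl
  | cons p rest ih => simpa [pvChain, List.foldl_cons, pvRepl_nil] using ih

theorem pvChain_decomp (xs zs : List (List Char × List Char)) (y : List Char × List Char)
    (s : List Char) :
    pvChain (xs ++ y :: zs) s = pvChain zs (pvRepl y.1 y.2 (pvChain xs s)) := by
  simp [pvChain, List.foldl_append]

theorem prefix_append_cases {α : Type} {p a b : List α} (h : p <+: a ++ b) :
    p <+: a ∨ ∃ q, p = a ++ q ∧ q <+: b := by
  by_cases hl : p.length ≤ a.length
  · exact Or.inl (List.prefix_of_prefix_length_le h (List.prefix_append a b) hl)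
  · right
    have ha : a <+: p := List.prefix_of_prefix_length_le (List.prefix_append a b) h (by omega)
    obtain ⟨q, hq⟩ := ha
    refine ⟨q, hq.symm, ?_⟩
    obtain ⟨w, hw⟩ := h
    rw [← hq, List.append_assoc] at hw
    exact ⟨w, List.append_cancel_left hw⟩

-- a block containing no occurrence of any listed code passes through the whole chain unchanged
theorem pvChain_append (u : List Char) :
    ∀ ps, (∀ p ∈ ps, pvGood p) → ∀ v,
      (∀ p ∈ ps, ∀ i < u.length, ¬ p.1 <+: (u ++ v).drop i) →
      pvChain ps (u ++ v) = u ++ pvChain ps v := by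
  intro ps
  induction ps with
  | nil => intro _ v _; rfl
  | cons q rest ih =>
    intro hgood v hu
    have hq : pvGood q := hgood q (by simp)
    rw [pvChain, List.foldl_cons, pvRepl_append q.2 u v (hu q (by simp))]
    have step : pvChain rest (u ++ pvRepl q.1 q.2 v) = u ++ pvChain rest (pvRepl q.1 q.2 v) := by
      apply ih (fun p hp => hgood p (by simp [hp])) (pvRepl q.1 q.2 v)
      intro p hp i hi hcon
      have hd : (u ++ pvRepl q.1 q.2 v).drop i = u.drop i ++ pvRepl q.1 q.2 v :=
        List.drop_append_of_le_length (le_of_lt hi)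
      rw [hd] at hcon
      have hgp : pvGood p := hgood p (by simp [hp])
      rcases prefix_append_cases hcon with hc | ⟨q', hq1, hq2⟩
      · apply hu p (by simp [hp]) i hi
        rw [List.drop_append_of_le_length (le_of_lt hi)]
        exact hc.trans (List.prefix_append _ _)
      · have hq2' : q' <+: v :=
          prefix_transfer hq.1 hq.2.2.1 hq.2.2.2 v.length v q' le_rfl
            (fun ch hch => hgp.2.1 ch (by rw [hq1]; exact List.mem_append_right _ hch)) hq2
        apply hu p (by simp [hp]) i hi
        rw [List.drop_append_of_le_length (le_of_lt hi), hq1]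
        obtain ⟨w, hw⟩ := hq2'
        exact ⟨w, by rw [← hw, List.append_assoc]⟩
    show pvChain rest (u ++ pvRepl q.1 q.2 v) = u ++ pvChain (q :: rest) v
    rw [step]
    rfl

-- ---- bridging A's String fold to pvChain ----
theorem foldA_eq_pvChain :
    ∀ ps : List (String × String), (∀ p ∈ ps, p.1.toList ≠ []) → ∀ s : String,
      (ps.foldl (fun t p => PySem.Str.replace t p.1 p.2) s).toList =
        pvChain (ps.map fun p => (p.1.toList, p.2.toList)) s.toList := by
  intro ps
  induction ps with
  | nil => intro _ s; rfl
  | cons p rest ih =>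
    intro h s
    rw [List.foldl_cons, List.map_cons, pvChain, List.foldl_cons,
      ih (fun q hq => h q (by simp [hq])) (PySem.Str.replace s p.1 p.2)]
    rw [PySem.Str.toList_replace, replace_eq_pvRepl _ _ _ (h p (by simp))]
    rfl

-- ---- first-match characterisations of the probe ----
theorem pvTry_none_iff {ps : List (List Char × List Char)} {l : List Char} :
    pvTry ps l = none ↔ ∀ p ∈ ps, ¬ p.1 <+: l := by
  induction ps with
  | nil => simp [pvTry]
  | cons p rest ih =>
    rw [pvTry]
    split
    · rename_i hp
      simp only [List.mem_cons]
      constructor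
      · intro h; cases h
      · intro h; exact absurd (List.isPrefixOf_iff_prefix.mp hp) (h p (Or.inl rfl))
    · rename_i hp
      simp only [List.mem_cons, ih]
      constructor
      · rintro h q hq
        rcases hq with rfl | hq'
        · simpa [List.isPrefixOf_iff_prefix] using hp
        · exact h q hq'
      · intro h q hq; exact h q (Or.inr hq)

theorem pvTry_some_dec {ps : List (List Char × List Char)} {l e : List Char} {k : Nat}
    (h : pvTry ps l = some (e, k)) :
    ∃ pre c0 post, ps = pre ++ c0 :: post ∧ (∀ p ∈ pre, ¬ p.1 <+: l) ∧
      c0.1 <+: l ∧ e = c0.2 ∧ k = c0.1.length := by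
  induction ps with
  | nil => simp [pvTry] at h
  | cons p rest ih =>
    rw [pvTry] at h
    split at h
    · rename_i hp
      cases h
      exact ⟨[], p, rest, by simp, by simp, List.isPrefixOf_iff_prefix.mp hp, rfl, rfl⟩
    · rename_i hp
      obtain ⟨pre, c0, post, h1, h2, h3, h4, h5⟩ := ih h
      refine ⟨p :: pre, c0, post, by simp [h1], ?_, h3, h4, h5⟩
      intro q hq
      rcases List.mem_cons.mp hq with hq' | hq'
      · subst hq'; simpa [List.isPrefixOf_iff_prefix] using hp
      · exact h2 q hq'

-- ---- no-overlap condition, transported to suffixes ----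
def pvNoOv (l : List Char) : Prop :=
  ∀ p1 ∈ pvTableB, ∀ p2 ∈ pvTableB, ∀ i j : Nat,
    p1.1 <+: l.drop i → p2.1 <+: l.drop j →
    ¬(p1.1 = p2.1 ∧ i = j) → i + p1.1.length ≤ j ∨ j + p2.1.length ≤ i

theorem pre_noOv {text : String} (h : Pre_clean_emoji_py text) : pvNoOv text.toList := by
  intro p1 h1 p2 h2 i j hi hj hne
  have n1 : p1.1 ≠ [] := (pvTableB_good p1 h1).1
  have n2 : p2.1 ≠ [] := (pvTableB_good p2 h2).1
  have bi : i < text.toList.length := by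
    by_contra hc
    rw [List.drop_eq_nil_of_le (by omega)] at hi
    exact n1 (List.prefix_nil.mp hi)
  have bj : j < text.toList.length := by
    by_contra hc
    rw [List.drop_eq_nil_of_le (by omega)] at hj
    exact n2 (List.prefix_nil.mp hj)
  exact h p1 h1 p2 h2 i bi j bj ⟨hi, hj, hne⟩

theorem noOv_suffix {u r : List Char} (h : pvNoOv (u ++ r)) : pvNoOv r := by
  intro p1 h1 p2 h2 i j hi hj hne
  have di : (u ++ r).drop (u.length + i) = r.drop i := by simp [List.drop_append]
  have dj : (u ++ r).drop (u.length + j) = r.drop j := by simp [List.drop_append]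
  have h' := h p1 h1 p2 h2 (u.length + i) (u.length + j) (di.symm ▸ hi) (dj.symm ▸ hj)
    (by rintro ⟨he, hij⟩; exact hne ⟨he, by omega⟩)
  omega

-- ---- the main induction: the chain of replaces equals the probe scan ----
theorem pvTableB_colon : ∀ p ∈ pvTableB, p.1.head? = some ':' := by
  have h : pvTableB.all (fun p => p.1.head? == some ':') = true := by
    unfold pvTableB pvTable
    simp only [List.map_cons, List.map_nil, String.reduceToList]
    decide
  intro p hp
  exact beq_iff_eq.mp (List.all_eq_true.mp h p hp)

theorem pvMain : ∀ n l, l.length ≤ n → pvNoOv l → pvChain pvTableB l = pvScan l := by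
  intro n
  induction n with
  | zero =>
    intro l hl _
    have : l = [] := List.length_eq_zero_iff.mp (Nat.le_zero.mp hl)
    subst this
    rw [pvChain_nil, pvScan_nil]
  | succ m ih =>
    intro l hl hno
    cases l with
    | nil => rw [pvChain_nil, pvScan_nil]
    | cons a t =>
      have hl' : t.length + 1 ≤ m + 1 := by simpa using hl
      cases htry : pvTry pvTableB (a :: t) with
      | none =>
        have hnone := pvTry_none_iff.mp htry
        have hch : pvChain pvTableB ([a] ++ t) = [a] ++ pvChain pvTableB t := by
          apply pvChain_append [a] pvTableB pvTableB_good t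
          intro p hp i hi
          have hi0 : i = 0 := by simpa using hi
          subst hi0
          simpa using hnone p hp
        have ht : pvChain pvTableB t = pvScan t :=
          ih t (by omega) (noOv_suffix (u := [a]) hno)
        rw [pvScan_cons_none htry]
        change pvChain pvTableB ([a] ++ t) = _
        rw [hch, ht]
        rfl
      | some ek =>
        obtain ⟨e, k⟩ := ek
        obtain ⟨pre, c0, post, hsplit, hpre, hc0, he, hk⟩ := pvTry_some_dec htry
        have hc0mem : c0 ∈ pvTableB := by
          rw [hsplit]; simp
        have hpremem : ∀ p ∈ pre, p ∈ pvTableB := by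
          intro p hp; rw [hsplit]; exact List.mem_append_left _ hp
        have hpostmem : ∀ p ∈ post, p ∈ pvTableB := by
          intro p hp; rw [hsplit]
          exact List.mem_append_right _ (List.mem_cons_of_mem _ hp)
        have hgood0 := pvTableB_good c0 hc0mem
        obtain ⟨r, hr⟩ := hc0
        have hcol : a = ':' := by
          have hh := pvTableB_colon c0 hc0mem
          cases hc : c0.1 with
          | nil => exact absurd hc hgood0.1
          | cons x y =>
            rw [hc] at hh hr
            rw [List.cons_append] at hr
            have hx : x = a := ((List.cons.injEq _ _ _ _).mp hr).1
            simp only [List.head?_cons, Option.some.injEq] at hh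
            rw [← hx, hh]
        subst hcol
        have hlen0 : 1 ≤ c0.1.length := by
          cases hq : c0.1 with
          | nil => exact absurd hq hgood0.1
          | cons x y => simp
        have hdrop : ((':' : Char) :: t).drop k = r := by
          rw [hk, ← hr]
          exact List.drop_left
        rw [pvScan_cons_some htry rfl, he, hdrop]
        have h1 : pvChain pre (c0.1 ++ r) = c0.1 ++ pvChain pre r := by
          apply pvChain_append c0.1 pre (fun p hp => pvTableB_good p (hpremem p hp)) r
          intro p hp i hi hcon
          rw [hr] at hcon
          by_cases hcase : p.1 = c0.1 ∧ i = 0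
          · apply hpre p hp
            rw [hcase.2, List.drop_zero] at hcon
            exact hcon
          · have hocc0 : c0.1 <+: ((':' : Char) :: t).drop 0 := by
              rw [List.drop_zero, ← hr]
              exact List.prefix_append _ _
            have hne1 : p.1 ≠ [] := (pvTableB_good p (hpremem p hp)).1
            have hov := hno p (hpremem p hp) c0 hc0mem i 0 hcon hocc0
              (fun hand => hcase ⟨hand.1, hand.2⟩)
            have hlp : 1 ≤ p.1.length := by
              cases hq : p.1 with
              | nil => exact absurd hq hne1
              | cons x y => simp
            omega
        have h2 : pvRepl c0.1 c0.2 (c0.1 ++ pvChain pre r) =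
            c0.2 ++ pvRepl c0.1 c0.2 (pvChain pre r) := by
          rw [pvRepl_prefix c0.2 hgood0.1 (List.prefix_append _ _), List.drop_left]
        have h3 : pvChain post (c0.2 ++ pvRepl c0.1 c0.2 (pvChain pre r)) =
            c0.2 ++ pvChain post (pvRepl c0.1 c0.2 (pvChain pre r)) := by
          apply pvChain_append c0.2 post (fun p hp => pvTableB_good p (hpostmem p hp))
          intro p hp i hi hcon
          have hgp := pvTableB_good p (hpostmem p hp)
          have hd : (c0.2 ++ pvRepl c0.1 c0.2 (pvChain pre r)).drop i =
              c0.2.drop i ++ pvRepl c0.1 c0.2 (pvChain pre r) :=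
            List.drop_append_of_le_length (le_of_lt hi)
          rw [hd] at hcon
          exact no_prefix_of_nonascii hgp.1 hgp.2.1
            (by intro hnil; rw [List.drop_eq_nil_iff] at hnil; omega)
            (fun ch hch => hgood0.2.2.2 ch (List.mem_of_mem_drop hch)) hcon
        have hrlen : r.length ≤ m := by
          have hlr : c0.1.length + r.length = t.length + 1 := by
            have hcg := congrArg List.length hr
            simpa using hcg
          omega
        have hnor : pvNoOv r := noOv_suffix (u := c0.1) (by rw [hr]; exact hno)
        calc pvChain pvTableB ((':' : Char) :: t)
            = pvChain (pre ++ c0 :: post) (c0.1 ++ r) := by rw [hsplit, hr]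
          _ = pvChain post (pvRepl c0.1 c0.2 (pvChain pre (c0.1 ++ r))) := pvChain_decomp _ _ _ _
          _ = pvChain post (c0.2 ++ pvRepl c0.1 c0.2 (pvChain pre r)) := by rw [h1, h2]
          _ = c0.2 ++ pvChain post (pvRepl c0.1 c0.2 (pvChain pre r)) := h3
          _ = c0.2 ++ pvChain (pre ++ c0 :: post) r := by rw [pvChain_decomp]
          _ = c0.2 ++ pvScan r := by rw [← hsplit, ih r hrlen hnor]

-- ---- bridging the probe scanner to B's word-run scanner ----
def pvWrap (p : List Char × List Char) : List Char × List Char := (':' :: p.1 ++ [':'], p.2)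

theorem tblB : pvTableB = pvEmoji.map pvWrap := by decide

theorem emoji_words : ∀ p ∈ pvEmoji, ∀ c ∈ p.1, pvIsWord c = true := by
  have h : pvEmoji.all (fun p => p.1.all pvIsWord) = true := by decide
  intro p hp c hc
  exact List.all_eq_true.mp (List.all_eq_true.mp h p hp) c hc

theorem emoji_keys_nodup : (pvEmoji.map Prod.fst).Nodup := by decide

theorem takeWhile_word_append (w r : List Char) (hw : ∀ c ∈ w, pvIsWord c = true) :
    (w ++ ':' :: r).takeWhile pvIsWord = w := by
  induction w with
  | nil => simp [List.takeWhile_cons]; decide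
  | cons a w' ih =>
    rw [List.cons_append, List.takeWhile_cons, if_pos (hw a (by simp))]
    rw [ih (fun c hc => hw c (by simp [hc]))]

theorem prefix_iff_run (w : List Char) (hw : ∀ c ∈ w, pvIsWord c = true) (t : List Char) :
    (w ++ [':']) <+: t ↔
      (t.takeWhile pvIsWord = w ∧ ∃ r, t.drop w.length = ':' :: r) := by
  constructor
  · rintro ⟨r, hr⟩
    have ht : t = w ++ ':' :: r := by rw [← hr]; simp
    subst ht
    exact ⟨takeWhile_word_append w r hw, ⟨r, by simpa using List.drop_left w (':' :: r)⟩⟩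
  · rintro ⟨hW, r, hD⟩
    have hpre : w <+: t := hW ▸ List.takeWhile_prefix pvIsWord
    obtain ⟨u, hu⟩ := hpre
    have hu' : u = ':' :: r := by
      rw [← hu] at hD
      simpa using hD
    exact ⟨r, by rw [← hu, hu']; simp⟩

theorem pvLookup_mem : ∀ (ps : List (List Char × List Char)),
    (ps.map Prod.fst).Nodup → ∀ q ∈ ps, pvLookup ps q.1 = some q.2 := by
  intro ps
  induction ps with
  | nil => intro _ q hq; cases hq
  | cons p rest ih =>
    intro hnd q hq
    rw [pvLookup]
    rcases List.mem_cons.mp hq with rfl | hmem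
    · rw [if_pos rfl]
    · by_cases hp : p.1 = q.1
      · exfalso
        rw [List.map_cons, List.nodup_cons] at hnd
        exact hnd.1 (hp ▸ (List.mem_map.mpr ⟨q, hmem, rfl⟩))
      · rw [if_neg hp]
        exact ih (by rw [List.map_cons, List.nodup_cons] at hnd; exact hnd.2) q hmem

theorem pvLookup_some_mem : ∀ (ps : List (List Char × List Char)) (w e : List Char),
    pvLookup ps w = some e → (w, e) ∈ ps := by
  intro ps
  induction ps with
  | nil => intro w e h; cases h
  | cons p rest ih =>
    intro w e h
    rw [pvLookup] at h
    split at h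
    · rename_i hp
      cases h
      rw [← hp]
      simp
    · exact List.mem_cons_of_mem _ (ih w e h)

-- a successful probe yields exactly B's word run, its lookup, and the length it consumes
theorem pvTry_some_run {t e : List Char} {k : Nat}
    (h : pvTry pvTableB ((':' : Char) :: t) = some (e, k)) :
    ∃ r, t.drop (t.takeWhile pvIsWord).length = ':' :: r ∧
      pvLookup pvEmoji (t.takeWhile pvIsWord) = some e ∧
      k = (t.takeWhile pvIsWord).length + 2 := by
  obtain ⟨pre, c0, post, hsplit, hpre, hc0, he, hk⟩ := pvTry_some_dec h
  have hc0mem : c0 ∈ pvTableB := by rw [hsplit]; simp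
  obtain ⟨q, hq, hqw⟩ := List.mem_map.mp (tblB ▸ hc0mem)
  have hc0pre : (q.1 ++ [':']) <+: t := by
    have : c0.1 <+: (':' : Char) :: t := hc0
    rw [← hqw] at this
    exact (List.cons_prefix_cons.mp this).2
  obtain ⟨hW, r, hD⟩ := (prefix_iff_run q.1 (emoji_words q hq) t).mp hc0pre
  refine ⟨r, by rw [hW]; exact hD, ?_, ?_⟩
  · rw [hW]
    rw [he, ← hqw]
    exact pvLookup_mem pvEmoji emoji_keys_nodup q hq
  · rw [hk, ← hqw, hW]
    simp [pvWrap]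

-- a failed probe means B's word run is not closed by ':' or not a known name
theorem pvTry_none_run {t : List Char}
    (h : pvTry pvTableB ((':' : Char) :: t) = none) :
    ∀ r e, ¬(t.drop (t.takeWhile pvIsWord).length = ':' :: r ∧
      pvLookup pvEmoji (t.takeWhile pvIsWord) = some e) := by
  rintro r e ⟨hD, hL⟩
  have hmem : (t.takeWhile pvIsWord, e) ∈ pvEmoji := pvLookup_some_mem _ _ _ hL
  have hword := emoji_words _ hmem
  have hpre : ((t.takeWhile pvIsWord) ++ [':']) <+: t :=
    (prefix_iff_run _ hword t).mpr ⟨rfl, r, hD⟩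
  have hwrap : pvWrap (t.takeWhile pvIsWord, e) ∈ pvTableB :=
    tblB ▸ List.mem_map.mpr ⟨_, hmem, rfl⟩
  exact pvTry_none_iff.mp h _ hwrap (List.cons_prefix_cons.mpr ⟨rfl, hpre⟩)

theorem scanB_eq_scan : ∀ n s, s.length ≤ n → pvScanB s = pvScan s := by
  intro n
  induction n with
  | zero =>
    intro s hs
    have : s = [] := List.length_eq_zero_iff.mp (Nat.le_zero.mp hs)
    subst this
    rw [pvScanB_nil, pvScan_nil]
  | succ m ih =>
    intro s hs
    cases s with
    | nil => rw [pvScanB_nil, pvScan_nil]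
    | cons c t =>
      have hs' : t.length ≤ m := by simpa using hs
      by_cases hc : c = ':'
      · subst hc
        cases htry : pvTry pvTableB ((':' : Char) :: t) with
        | none =>
          rw [pvScan_cons_none htry, pvScanB_miss (pvTry_none_run htry), ih t hs']
        | some ek =>
          obtain ⟨e, k⟩ := ek
          obtain ⟨r, hD, hL, hk⟩ := pvTry_some_run htry
          have hdrop : ((':' : Char) :: t).drop k = r := by
            rw [hk]
            show t.drop ((t.takeWhile pvIsWord).length + 1) = r
            rw [← List.drop_drop, hD]
            rfl
          have hrlen : r.length ≤ m := by
            have := congrArg List.length hD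
            simp only [List.length_drop, List.length_cons] at this
            omega
          rw [pvScan_cons_some htry rfl, pvScanB_hit hD hL, hdrop, ih r hrlen]
      · rw [pvScanB_cons_other hc, pvScan_cons_none ?_, ih t hs']
        apply pvTry_none_iff.mpr
        intro p hp hcon
        have hh := pvTableB_colon p hp
        cases hq : p.1 with
        | nil => exact (pvTableB_good p hp).1 hq
        | cons x y =>
          rw [hq] at hcon hh
          simp only [List.head?_cons, Option.some.injEq] at hh
          exact hc ((List.cons_prefix_cons.mp hcon).1 ▸ hh ▸ rfl)

-- ===== VERDICT (by name: the statement is the Claim_ definition above) =====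
theorem clean_emoji_py_spec : Claim_equal_clean_emoji_py := by
  intro text _ hpre
  unfold Spec_clean_emoji_py
  apply String.toList_inj.mp
  rw [clean_emoji_py, clean_emoji_py_alt, foldA_eq_pvChain pvTable (by decide) text]
  have hofs : (String.ofList (pvScanB text.toList)).toList = pvScanB text.toList := by simp
  rw [hofs, scanB_eq_scan text.toList.length text.toList le_rfl]
  exact pvMain text.toList.length text.toList le_rfl (pre_noOv hpre)
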